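-- pv_equiv track=rewrite | github.com/MeshanKhosla/2x2-Cube-Solver | backend/scripts/main.py | half_turn_metric
-- ===== SOURCE A (Python) =====
-- def half_turn_metric(path_in_moves):
-- 	"""
-- 	Converts a solution to the cube with consecutive letters into half turns
-- 	>>> ["R", "R", "U", "F'", "F'"]
-- 	["R2", "U", "F2"]
-- 	>>> ["R", "R", "U", "F'", "F'", 'L']
-- 	["R2", "U", "F2", "L"]
-- 	"""
-- 	half_turn_result = []
-- 	skip = False
-- 	for i in range(len(path_in_moves)):
-- 		if (i == len(path_in_moves) - 1) and not skip:
-- 			half_turn_result.append(path_in_moves[i])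
-- 			break
-- 		if skip:
-- 			skip = False
-- 			continue
-- 		cur_move = path_in_moves[i]
-- 		next_move = path_in_moves[i + 1]
-- 		new_move = cur_move
-- 		if cur_move == next_move:
-- 			new_move = cur_move[0] + "2"
-- 			skip = True
-- 		half_turn_result.append(new_move)
-- 	return half_turn_result
-- ===== SOURCE B (Python) =====
-- def half_turn_metric(path_in_moves):
--     # Run-length formulation: walk maximal runs of equal moves, emit one
--     # half turn per pair and the leftover move if the run length is odd.
--     result = []
--     i = 0
--     n = len(path_in_moves)
--     while i < n:
--         move = path_in_moves[i]
--         j = i + 1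
--         while j < n and path_in_moves[j] == move:
--             j += 1
--         run = j - i
--         for _ in range(run // 2):
--             result.append(move[0] + "2")
--         if run % 2:
--             result.append(move)
--         i = j
--     return result
-- ===== Notes on version B (the rewrite author's own statement) =====
-- stated objective: simpler
-- what changed: Replaces the skip-flag pairwise pass (peek at the next element, set a flag to skip it) with a run-length formulation: find each maximal run of equal moves, emit run//2 half turns and the leftover move if the run length is odd.
import Mathlib
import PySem

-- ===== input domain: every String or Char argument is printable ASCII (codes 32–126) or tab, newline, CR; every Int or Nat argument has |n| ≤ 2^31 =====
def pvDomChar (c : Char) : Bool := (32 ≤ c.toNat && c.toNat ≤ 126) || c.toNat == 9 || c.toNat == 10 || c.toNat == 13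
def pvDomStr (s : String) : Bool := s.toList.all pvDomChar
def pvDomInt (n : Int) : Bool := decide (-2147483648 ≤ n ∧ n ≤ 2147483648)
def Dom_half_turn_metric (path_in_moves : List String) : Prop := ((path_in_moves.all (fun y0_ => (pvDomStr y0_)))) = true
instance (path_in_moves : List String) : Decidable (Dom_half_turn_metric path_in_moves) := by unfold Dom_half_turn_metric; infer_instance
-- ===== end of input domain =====

-- B replaces A's skip-flag pairwise pass by a run-length pass (same O(n) cost, plainer);
-- equivalence is about return values only (neither mutates its argument).

-- ===== PORT A =====
-- Python's cur_move[0] (raises on ""; such inputs are excluded by Pre_, headD is a total stand-in there)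
def pyHead (s : String) : String := String.ofList [s.toList.headD ' ']

-- the for-loop of A: index i, skip flag, accumulator
def goA (xs : List String) (i : Nat) (skip : Bool) (acc : List String) : List String :=
  if _h : i < xs.length then
    if i = xs.length - 1 ∧ skip = false then acc ++ [xs.getD i ""]   -- append and break
    else if skip then goA xs (i + 1) false acc                        -- skip = False; continue
    else
      let cur := xs.getD i ""
      let nxt := xs.getD (i + 1) ""
      if cur = nxt then goA xs (i + 1) true (acc ++ [pyHead cur ++ "2"])
      else goA xs (i + 1) false (acc ++ [cur])
  else acc
termination_by xs.length - i

def half_turn_metric (path_in_moves : List String) : List String :=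
  goA path_in_moves 0 false []

-- ===== PORT B =====
-- inner while loop of Source B: advance j while it is in range and path_in_moves[j] == move
def runEndB (xs : List String) (move : String) (j : Nat) : Nat :=
  if _h : j < xs.length ∧ xs.getD j "" = move then runEndB xs move (j + 1) else j
termination_by xs.length - j

-- runEndB never moves j backwards (needed for termination of the outer loop)
theorem runEndB_ge (xs : List String) (move : String) :
    ∀ (n j : Nat), xs.length - j ≤ n → j ≤ runEndB xs move j := by
  intro n
  induction n with
  | zero =>
      intro j h
      rw [runEndB]
      have hc : ¬ (j < xs.length ∧ xs.getD j "" = move) := by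
        intro hc; omega
      rw [dif_neg hc]
  | succ n ih =>
      intro j h
      rw [runEndB]
      by_cases hc : j < xs.length ∧ xs.getD j "" = move
      · rw [dif_pos hc]
        have := ih (j + 1) (by omega)
        omega
      · rw [dif_neg hc]

-- the two emit steps of Source B for one run: run//2 half turns, then the odd leftover
def emitRun (x : String) (run : Nat) : List String :=
  List.replicate (run / 2) (pyHead x ++ "2") ++ (if run % 2 = 1 then [x] else [])

-- outer while loop of Source B: i jumps to the end of the current run
def goB (xs : List String) (result : List String) (i : Nat) : List String :=
  if _h : i < xs.length then
    let move := xs.getD i ""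
    let j := runEndB xs move (i + 1)
    let run := j - i
    goB xs (result ++ emitRun move run) j
  else result
termination_by xs.length - i
decreasing_by
  have := runEndB_ge xs (xs.getD i "") (xs.length - (i + 1)) (i + 1) (le_refl _)
  omega

def half_turn_metric_alt (path_in_moves : List String) : List String :=
  goB path_in_moves [] 0

-- ===== PRECONDITION & SPEC =====
-- Pre_ excludes exactly the inputs containing two adjacent equal empty-string moves: there the
-- Python A raises IndexError on cur_move[0] (and the Python B raises on move[0] likewise).
def Pre_half_turn_metric (path_in_moves : List String) : Prop :=
  ¬ [("" : String), ""] <:+: path_in_moves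
instance (path_in_moves : List String) : Decidable (Pre_half_turn_metric path_in_moves) := by
  unfold Pre_half_turn_metric; infer_instance

def pvWitness_half_turn_metric : List String := ["R", "R", "U", "F'", "F'", "L"]

def Spec_half_turn_metric (path_in_moves : List String) (out : List String) : Prop := out = half_turn_metric_alt path_in_moves
instance (path_in_moves : List String) (out : List String) : Decidable (Spec_half_turn_metric path_in_moves out) := by unfold Spec_half_turn_metric; infer_instance

-- ===== CLAIM (what is proved, stated in full; the proofs are below) =====
def Claim_equal_half_turn_metric : Prop := ∀ (path_in_moves : List String), Dom_half_turn_metric path_in_moves → Pre_half_turn_metric path_in_moves → Spec_half_turn_metric path_in_moves (half_turn_metric path_in_moves)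

-- ===== LEMMAS AND PROOFS =====

-- reference function both ports are reduced to
def specHT : List String → List String
  | [] => []
  | [x] => [x]
  | x :: y :: rest => if x = y then (pyHead x ++ "2") :: specHT rest else x :: specHT (y :: rest)

-- proof-side helper: number of leading elements of a list equal to x
def leadCount (x : String) : List String → Nat
  | [] => 0
  | y :: t => if y = x then leadCount x t + 1 else 0

theorem leadCount_take (x : String) (t : List String) :
    t.take (leadCount x t) = List.replicate (leadCount x t) x := by
  induction t with
  | nil => simp [leadCount]
  | cons y t ih =>
      by_cases h : y = x
      · simp [leadCount, h, List.replicate_succ, ih]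
      · simp [leadCount, h]

theorem leadCount_drop (x : String) (t : List String) :
    (t.drop (leadCount x t)).head? ≠ some x := by
  induction t with
  | nil => simp [leadCount]
  | cons y t ih =>
      by_cases h : y = x
      · simpa [leadCount, h] using ih
      · have h0 : leadCount x (y :: t) = 0 := by simp [leadCount, h]
        rw [h0]
        simp
        intro e; exact h e

theorem specRun (x : String) (t' : List String) (ht : t'.head? ≠ some x) :
    ∀ n, specHT (List.replicate n x ++ t')
      = List.replicate (n / 2) (pyHead x ++ "2") ++ (if n % 2 = 1 then [x] else []) ++ specHT t' := by
  intro n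
  induction n using Nat.strong_induction_on with
  | _ n ih =>
    match n with
    | 0 => simp
    | 1 =>
        match t' with
        | [] => simp [specHT]
        | y :: u =>
            have hxy : x ≠ y := fun e => ht (by simp [e])
            simp [specHT, hxy]
    | (n + 2) =>
        have h2 : List.replicate (n + 2) x ++ t' = x :: x :: (List.replicate n x ++ t') := by
          simp [List.replicate_succ]
        have h3 : specHT (x :: x :: (List.replicate n x ++ t'))
            = (pyHead x ++ "2") :: specHT (List.replicate n x ++ t') := by
          simp [specHT]
        rw [h2, h3, ih n (by omega)]
        have hdiv : (n + 2) / 2 = n / 2 + 1 := by omega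
        have hmod : (n + 2) % 2 = n % 2 := by omega
        simp [hdiv, hmod, List.replicate_succ]

-- runEndB computes j plus the length of the run of `move` starting at j
theorem runEndB_eq_leadCount (xs : List String) (move : String) :
    ∀ (n j : Nat), xs.length - j ≤ n →
      runEndB xs move j = j + leadCount move (xs.drop j) := by
  intro n
  induction n with
  | zero =>
      intro j h
      rw [runEndB]
      have hc : ¬ (j < xs.length ∧ xs.getD j "" = move) := by intro hc; omega
      rw [dif_neg hc]
      rw [List.drop_eq_nil_of_le (by omega : xs.length ≤ j)]
      simp [leadCount]
  | succ n ih =>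
      intro j h
      rw [runEndB]
      by_cases hj : j < xs.length
      · have hdrop : xs.drop j = xs[j] :: xs.drop (j + 1) := List.drop_eq_getElem_cons hj
        have hg : xs.getD j "" = xs[j] := List.getD_eq_getElem xs "" hj
        by_cases he : xs.getD j "" = move
        · rw [dif_pos ⟨hj, he⟩, ih (j + 1) (by omega), hdrop]
          have : leadCount move (xs[j] :: xs.drop (j + 1))
              = leadCount move (xs.drop (j + 1)) + 1 := by
            simp [leadCount, hg ▸ he]
          rw [this]; omega
        · rw [dif_neg (by intro hc; exact he hc.2), hdrop]
          have : leadCount move (xs[j] :: xs.drop (j + 1)) = 0 := by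
            simp [leadCount]
            intro e; exact he (hg.trans e)
          rw [this]
          omega
      · have hc : ¬ (j < xs.length ∧ xs.getD j "" = move) := by intro hc; exact hj hc.1
        rw [dif_neg hc, List.drop_eq_nil_of_le (by omega : xs.length ≤ j)]
        simp [leadCount]

theorem goB_eq (xs : List String) :
    ∀ (n i : Nat) (acc : List String), xs.length - i ≤ n →
      goB xs acc i = acc ++ specHT (xs.drop i) := by
  intro n
  induction n with
  | zero =>
      intro i acc h
      rw [goB]
      have hi : ¬ i < xs.length := by omega
      rw [dif_neg hi, List.drop_eq_nil_of_le (by omega : xs.length ≤ i)]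
      simp [specHT]
  | succ n ih =>
      intro i acc h
      rw [goB]
      by_cases hi : i < xs.length
      · rw [dif_pos hi]
        have hrun : runEndB xs (xs.getD i "") (i + 1)
            = (i + 1) + leadCount (xs.getD i "") (xs.drop (i + 1)) :=
          runEndB_eq_leadCount xs (xs.getD i "") (xs.length - (i + 1)) (i + 1) (le_refl _)
        show goB xs (acc ++ emitRun (xs.getD i "") (runEndB xs (xs.getD i "") (i + 1) - i))
              (runEndB xs (xs.getD i "") (i + 1)) = acc ++ specHT (xs.drop i)
        rw [hrun, ih (i + 1 + leadCount (xs.getD i "") (xs.drop (i + 1))) _ (by omega)]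
        have hg : xs.getD i "" = xs[i] := List.getD_eq_getElem xs "" hi
        set mv := xs.getD i "" with hmv
        set m := leadCount mv (xs.drop (i + 1)) with hm
        have hsub : i + 1 + m - i = m + 1 := by omega
        have hdd : xs.drop (i + 1 + m) = (xs.drop (i + 1)).drop m := by
          rw [List.drop_drop]
        have hdec : xs.drop i = List.replicate (m + 1) mv ++ (xs.drop (i + 1)).drop m := by
          rw [List.drop_eq_getElem_cons hi]
          conv_lhs => rw [← List.take_append_drop m (xs.drop (i + 1))]
          rw [hm, leadCount_take]
          simp [List.replicate_succ, hg]
        rw [hsub, hdd, hdec,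
            specRun mv _ (by rw [hm]; exact leadCount_drop mv (xs.drop (i + 1))) (m + 1)]
        simp only [emitRun, List.append_assoc]
      · rw [dif_neg hi, List.drop_eq_nil_of_le (by omega : xs.length ≤ i)]
        simp [specHT]

theorem goA_skip (xs : List String) (i : Nat) (acc : List String) :
    goA xs i true acc = goA xs (i + 1) false acc := by
  by_cases h : i < xs.length
  · rw [goA]
    simp [h]
  · have h2 : ¬ i + 1 < xs.length := by omega
    rw [goA, goA]
    simp [h, h2]

theorem goA_eq : ∀ (n : Nat) (xs : List String) (i : Nat) (acc : List String),
    xs.length ≤ i + n → goA xs i false acc = acc ++ specHT (xs.drop i) := by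
  intro n
  induction n with
  | zero =>
      intro xs i acc h
      rw [goA]
      have h1 : ¬ i < xs.length := by omega
      simp [h1, List.drop_eq_nil_of_le (by omega : xs.length ≤ i), specHT]
  | succ n ih =>
      intro xs i acc h
      by_cases hi : i < xs.length
      · rw [goA, dif_pos hi]
        by_cases hlast : i = xs.length - 1
        · rw [if_pos ⟨hlast, rfl⟩]
          have hi1 : ¬ i + 1 < xs.length := by omega
          rw [List.drop_eq_getElem_cons hi, List.drop_eq_nil_of_le (by omega : xs.length ≤ i + 1)]
          simp [specHT, List.getD, List.getElem?_eq_getElem hi]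
        · rw [if_neg (by simp [hlast])]
          have hi1 : i + 1 < xs.length := by omega
          simp only [Bool.false_eq_true, if_false]
          rw [List.drop_eq_getElem_cons hi, List.drop_eq_getElem_cons hi1]
          by_cases heq : xs.getD i "" = xs.getD (i + 1) ""
          · rw [if_pos heq, goA_skip, ih xs (i + 2) _ (by omega)]
            have : specHT (xs[i] :: xs[i + 1] :: xs.drop (i + 1 + 1))
                = (pyHead xs[i] ++ "2") :: specHT (xs.drop (i + 2)) := by
              have : xs[i] = xs[i + 1] := by
                rw [← List.getD_eq_getElem xs "" hi, ← List.getD_eq_getElem xs "" hi1]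
                exact heq
              simp [specHT, this]
            rw [this]
            simp [List.getD, List.getElem?_eq_getElem hi]
          · rw [if_neg heq, ih xs (i + 1) _ (by omega), List.drop_eq_getElem_cons hi1]
            have hne : xs[i] ≠ xs[i + 1] := by
              rw [← List.getD_eq_getElem xs "" hi, ← List.getD_eq_getElem xs "" hi1]
              exact heq
            simp [specHT, hne, List.getD, List.getElem?_eq_getElem hi]
      · rw [goA]
        simp [hi, List.drop_eq_nil_of_le (by omega : xs.length ≤ i), specHT]

theorem ports_agree (xs : List String) : half_turn_metric xs = half_turn_metric_alt xs := by
  rw [half_turn_metric, half_turn_metric_alt,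
      goB_eq xs xs.length 0 [] (by omega),
      goA_eq xs.length xs 0 [] (by omega)]

-- ===== VERDICT (by name: the statement is the Claim_ definition above) =====
theorem half_turn_metric_spec : Claim_equal_half_turn_metric := by
  intro xs _ _
  unfold Spec_half_turn_metric
  exact ports_agree xs
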